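-- pv_equiv track=rewrite | github.com/madeibao/CTest | Huawei/端口合并.py | result
-- ===== SOURCE A (Python) =====
-- import copy
--
-- def canMerge(m, n):
--     # 从用例 1 输出的 2,3,2 来看，未合并的端口组是不能去重和排序的，因此这里需要浅克隆下，避免改变原数组顺序
--     # 或者在这里加边界条件
--     if m is None or n is None or len(m)<2 or len(n)<2:return False
--     m = copy.copy(m)
--     n = copy.copy(n)
--     m.sort() # 排序下，很容易想到的
--     n.sort()
--     i= 0
--     j = 0
--     count = 0 # 初始化
--     # 考虑边界条件。
--     while i<len(m) and j <len(n) and count < 2: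
--         # 三种情况，逐一分析。
--         if m[i] == n[j]:
--             i+=1
--             j+=1
--             count+=1
--         elif m[i]>n[j]:
--             j+=1
--         else:
--             i+=1
--     return count>=2 # 判断是否大于2
--
-- def result(matrix):
--     flag = True
--     while flag:
--         flag = False # 进来先给他置为false
--         # 一个个来
--         for i in range(len(matrix)-1, 0 ,-1):
--             for j in range(i-1,-1,-1):
--                 if canMerge(matrix[i], matrix[j]):
--                     tmp = []
--                     # 先把matrix[i]搞进来，而不是append，这里要注意下。
--                     tmp.extend(matrix[i])
--                     tmp.extend(matrix[j])
--                     matrix[j] = list(sorted(set(tmp))) # 这一步厉害啊，先用set进行去重，然后进行排序。优秀。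
--                     matrix[i] = None # 把matrix[i]置空。i比j小，所以下一次循环的时候还是能把j跟大伙比一遍
--                     flag = True # 这里要给他搞成true，就是让他再进行比较一遍。
--                     break # 这里就是要实现，合并之后，还能把所有的比一遍。
--     return list(filter(lambda x:x is not None, matrix))
-- ===== SOURCE B (Python) =====
-- # B: same merge fixpoint, but on a dense shrinking list (no None sentinels, no final
-- # filter) and a hash-count overlap test (one dict pass, no sorting). Note: A mutates
-- # `matrix` in place; B leaves it untouched — the equivalence claimed is about the
-- # return value only.
--
-- def _overlap2(x, y):
--     """True iff x and y share at least 2 elements counted with multiplicity."""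
--     if len(x) < 2 or len(y) < 2:
--         return False
--     remaining = {}
--     for e in x:
--         remaining[e] = remaining.get(e, 0) + 1
--     seen = 0
--     for e in y:
--         c = remaining.get(e, 0)
--         if c > 0:
--             remaining[e] = c - 1
--             seen += 1
--             if seen >= 2:
--                 return True
--     return False
--
-- def result(matrix):
--     groups = list(matrix)
--     changed = True
--     while changed:
--         changed = False
--         k = len(groups) - 1
--         while k > 0:
--             for t in range(k - 1, -1, -1):
--                 if _overlap2(groups[k], groups[t]):
--                     groups[t] = sorted(set(groups[k]) | set(groups[t]))
--                     del groups[k]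
--                     changed = True
--                     break
--             k -= 1
--     return groups
-- ===== Notes on version B (the rewrite author's own statement) =====
-- stated objective: alternative
-- what changed: The >=2-common-elements test is a single hash-counting dict pass instead of copy+sort+two-pointer, and the merge fixpoint runs on a dense shrinking list (merged groups deleted in place, result returned directly) instead of A's fixed-length matrix with None sentinels and a final filter.
import Mathlib
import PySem

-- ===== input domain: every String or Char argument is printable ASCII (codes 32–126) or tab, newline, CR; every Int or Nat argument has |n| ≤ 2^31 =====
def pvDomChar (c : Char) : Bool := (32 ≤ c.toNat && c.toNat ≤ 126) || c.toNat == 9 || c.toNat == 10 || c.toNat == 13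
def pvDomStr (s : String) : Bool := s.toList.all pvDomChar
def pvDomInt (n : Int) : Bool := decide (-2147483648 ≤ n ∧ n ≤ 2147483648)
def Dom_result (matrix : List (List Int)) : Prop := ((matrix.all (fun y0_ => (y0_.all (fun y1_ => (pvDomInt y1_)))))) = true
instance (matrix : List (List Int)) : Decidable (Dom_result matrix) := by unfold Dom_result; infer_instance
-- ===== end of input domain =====

-- B re-implements A's merge fixpoint with a hash-count overlap test (no sorting) on a dense
-- shrinking list (no None sentinels, no final filter); A mutates `matrix` in place, B does not —
-- the equivalence proved is about the return value.

-- ===== PORT A =====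
-- canMerge's while loop: two pointers over the two sorted copies, counting common elements
def cmLoop (m n : List Int) (i j count : Nat) : Bool :=
  if h : i < m.length ∧ j < n.length ∧ count < 2 then
    if m[i]'h.1 = n[j]'h.2.1 then cmLoop m n (i + 1) (j + 1) (count + 1)
    else if m[i]'h.1 > n[j]'h.2.1 then cmLoop m n i (j + 1) count
    else cmLoop m n (i + 1) j count
  else decide (2 ≤ count)
termination_by (m.length - i) + (n.length - j)
decreasing_by all_goals omega

def canMerge : Option (List Int) → Option (List Int) → Bool
  | none, _ => false
  | some _, none => false
  | some m, some n =>
    if m.length < 2 ∨ n.length < 2 then false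
    else cmLoop (PySem.List.sorted m (fun x => x) false) (PySem.List.sorted n (fun x => x) false) 0 0 0

-- inner `for j in range(i-1, -1, -1)` with its break: first merge found, if any
def innerA (mat : List (Option (List Int))) (i : Nat) : Nat → Option (List (Option (List Int)))
  | 0 => none
  | j + 1 =>
    if canMerge (mat.getD i none) (mat.getD j none) then
      some ((mat.set j (some (PySem.List.sorted
              (PySem.Set.ofList (((mat.getD i none).getD []) ++ ((mat.getD j none).getD [])))
              (fun x => x) false))).set i none)
    else innerA mat i j

-- outer `for i in range(len(matrix)-1, 0, -1)`, threading the flag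
def passA : List (Option (List Int)) → Nat → Bool → List (Option (List Int)) × Bool
  | mat, 0, flag => (mat, flag)
  | mat, i + 1, flag =>
    match innerA mat (i + 1) (i + 1) with
    | some mat' => passA mat' i true
    | none => passA mat i flag

-- `while flag:` — each flagged pass removes one group, so length+2 fuel always suffices
def whileA : Nat → List (Option (List Int)) → List (Option (List Int))
  | 0, mat => mat
  | fuel + 1, mat =>
    let r := passA mat (mat.length - 1) false
    if r.2 then whileA fuel r.1 else r.1

def result (matrix : List (List Int)) : List (List Int) :=
  (whileA (matrix.length + 2) (matrix.map some)).reduceOption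

-- ===== PORT B =====
-- `for e in y:` of _overlap2: decrement the remaining-count dict, early True at 2
def ov2Loop (remaining : PySem.Dict Int Int) (seen : Nat) : List Int → Bool
  | [] => false
  | e :: ys =>
    let c := remaining.getD e 0
    if 0 < c then
      if 2 ≤ seen + 1 then true
      else ov2Loop (remaining.insert e (c - 1)) (seen + 1) ys
    else ov2Loop remaining seen ys

def overlap2 (x y : List Int) : Bool :=
  if x.length < 2 ∨ y.length < 2 then false
  else ov2Loop (x.foldl (fun d e => d.insert e (d.getD e 0 + 1)) PySem.Dict.empty) 0 y

-- inner `for t in range(k-1, -1, -1)` with its break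
def innerB (groups : List (List Int)) (k : Nat) : Nat → Option (List (List Int))
  | 0 => none
  | t + 1 =>
    if overlap2 (groups.getD k []) (groups.getD t []) then
      some ((groups.set t (PySem.List.sorted
              (PySem.Set.union (PySem.Set.ofList (groups.getD k [])) (PySem.Set.ofList (groups.getD t [])))
              (fun x => x) false)).eraseIdx k)
    else innerB groups k t

-- inner `while k > 0: … k -= 1`
def loopB : List (List Int) → Nat → Bool → List (List Int) × Bool
  | groups, 0, changed => (groups, changed)
  | groups, k + 1, changed =>
    match innerB groups (k + 1) (k + 1) with
    | some g' => loopB g' k true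
    | none => loopB groups k changed

-- `while changed:` — same fuel bound as A's loop
def whileB : Nat → List (List Int) → List (List Int)
  | 0, groups => groups
  | fuel + 1, groups =>
    let r := loopB groups (groups.length - 1) false
    if r.2 then whileB fuel r.1 else r.1

def result_alt (matrix : List (List Int)) : List (List Int) :=
  whileB (matrix.length + 2) matrix

-- ===== PRECONDITION & SPEC =====
def Spec_result (matrix : List (List Int)) (out : List (List Int)) : Prop := out = result_alt matrix
instance (matrix : List (List Int)) (out : List (List Int)) : Decidable (Spec_result matrix out) := by unfold Spec_result; infer_instance

-- ===== CLAIM (what is proved, stated in full; the proofs are below) =====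
def Claim_equal_result : Prop := ∀ (matrix : List (List Int)), Dom_result matrix → Spec_result matrix (result matrix)

-- ===== LEMMAS AND PROOFS =====

-- number of live (non-None) entries among the first i positions
def liveIdx (mat : List (Option (List Int))) (i : Nat) : Nat :=
  ((mat.take i).reduceOption).length


-- ---- multiset-intersection facts used by both predicate characterizations ----
lemma interCons (a : Int) (s t : Multiset Int) : (a ::ₘ s) ∩ (a ::ₘ t) = a ::ₘ (s ∩ t) := by
  rw [Multiset.cons_inter_of_pos s (Multiset.mem_cons_self a t), Multiset.erase_cons_head]

lemma interConsRight (b : Int) (s t : Multiset Int) (h : b ∉ s) : s ∩ (b ::ₘ t) = s ∩ t := by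
  rw [Multiset.inter_comm, Multiset.cons_inter_of_neg t h, Multiset.inter_comm]

lemma interConsMem (a : Int) (s t : Multiset Int) (h : a ∈ s) :
    Multiset.card (s ∩ (a ::ₘ t)) = 1 + Multiset.card (s.erase a ∩ t) := by
  rw [Multiset.inter_comm, Multiset.cons_inter_of_pos t h, Multiset.card_cons, Multiset.inter_comm]
  omega

-- A's two-pointer loop counts the multiset intersection (capped at 2) of the remaining suffixes
lemma cmLoop_eq (m n : List Int) (hm : m.Pairwise (· ≤ ·)) (hn : n.Pairwise (· ≤ ·)) :
    ∀ (d i j c : Nat), (m.length - i) + (n.length - j) ≤ d →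
      cmLoop m n i j c =
        decide (2 ≤ c + Multiset.card ((↑(m.drop i) : Multiset Int) ∩ ↑(n.drop j))) := by
  intro d
  induction d with
  | zero =>
    intro i j c hle
    have hi : m.length ≤ i := by omega
    rw [cmLoop, dif_neg (by omega), List.drop_eq_nil_of_le hi]
    have hz : (↑([] : List Int) : Multiset Int) = 0 := rfl
    rw [hz, Multiset.zero_inter]
    exact decide_eq_decide.mpr (by simp)
  | succ d ih =>
    intro i j c hle
    rw [cmLoop]
    by_cases h : i < m.length ∧ j < n.length ∧ c < 2
    · rw [dif_pos h]
      have hdm : m.drop i = m[i]'h.1 :: m.drop (i + 1) := List.drop_eq_getElem_cons h.1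
      have hdn : n.drop j = n[j]'h.2.1 :: n.drop (j + 1) := List.drop_eq_getElem_cons h.2.1
      have hpm : (m.drop i).Pairwise (· ≤ ·) := List.Pairwise.drop hm
      have hpn : (n.drop j).Pairwise (· ≤ ·) := List.Pairwise.drop hn
      by_cases heq : m[i]'h.1 = n[j]'h.2.1
      · rw [if_pos heq, ih (i + 1) (j + 1) (c + 1) (by omega)]
        conv_rhs => rw [hdm, hdn, ← heq]
        rw [← Multiset.cons_coe, ← Multiset.cons_coe, interCons, Multiset.card_cons]
        exact decide_eq_decide.mpr (by omega)
      · rw [if_neg heq]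
        by_cases hgt : m[i]'h.1 > n[j]'h.2.1
        · rw [if_pos hgt, ih i (j + 1) c (by omega)]
          have hnotmem : n[j]'h.2.1 ∉ m.drop i := by
            intro hmem
            rw [hdm] at hmem
            rcases List.mem_cons.mp hmem with h1 | h1
            · omega
            · rw [hdm] at hpm
              have := (List.pairwise_cons.mp hpm).1 _ h1
              omega
          conv_rhs => rw [hdn]
          rw [← Multiset.cons_coe, interConsRight _ _ _ (by simpa using hnotmem)]
        · have hlt : m[i]'h.1 < n[j]'h.2.1 := by omega
          rw [if_neg hgt, ih (i + 1) j c (by omega)]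
          have hnotmem : m[i]'h.1 ∉ n.drop j := by
            intro hmem
            rw [hdn] at hmem
            rcases List.mem_cons.mp hmem with h1 | h1
            · omega
            · rw [hdn] at hpn
              have := (List.pairwise_cons.mp hpn).1 _ h1
              omega
          conv_rhs => rw [hdm]
          rw [← Multiset.cons_coe, Multiset.cons_inter_of_neg _ (by simpa using hnotmem)]
    · rw [dif_neg h]
      by_cases hc : 2 ≤ c
      · exact decide_eq_decide.mpr (by constructor <;> (intro _; omega))
      · have hij : m.length ≤ i ∨ n.length ≤ j := by omega
        rcases hij with hi | hj
        · rw [List.drop_eq_nil_of_le hi]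
          have hz : (↑([] : List Int) : Multiset Int) = 0 := rfl
          rw [hz, Multiset.zero_inter]
          exact decide_eq_decide.mpr (by simp)
        · rw [List.drop_eq_nil_of_le hj]
          have hz : (↑([] : List Int) : Multiset Int) = 0 := rfl
          rw [hz, Multiset.inter_zero]
          exact decide_eq_decide.mpr (by simp)

lemma canMerge_some (x y : List Int) :
    canMerge (some x) (some y) =
      if x.length < 2 ∨ y.length < 2 then false
      else decide (2 ≤ Multiset.card ((↑x : Multiset Int) ∩ ↑y)) := by
  show (if x.length < 2 ∨ y.length < 2 then false
      else cmLoop (PySem.List.sorted x (fun x => x) false) (PySem.List.sorted y (fun x => x) false) 0 0 0) = _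
  by_cases h : x.length < 2 ∨ y.length < 2
  · rw [if_pos h, if_pos h]
  · rw [if_neg h, if_neg h]
    have hm : (PySem.List.sorted x (fun x => x) false).Pairwise (· ≤ ·) :=
      PySem.List.sorted_pairwise x (fun x => x)
    have hn : (PySem.List.sorted y (fun x => x) false).Pairwise (· ≤ ·) :=
      PySem.List.sorted_pairwise y (fun x => x)
    rw [cmLoop_eq _ _ hm hn ((PySem.List.sorted x (fun x => x) false).length
          + (PySem.List.sorted y (fun x => x) false).length) 0 0 0 (by omega)]
    rw [List.drop_zero, List.drop_zero]
    rw [Multiset.coe_eq_coe.mpr (PySem.List.sorted_perm x (fun x => x) false),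
        Multiset.coe_eq_coe.mpr (PySem.List.sorted_perm y (fun x => x) false)]
    exact decide_eq_decide.mpr (by omega)

-- B's decrement loop counts the same multiset intersection
lemma ov2Loop_eq : ∀ (y : List Int) (d : PySem.Dict Int Int) (m : Multiset Int) (seen : Nat),
    seen < 2 → (∀ e, d.getD e 0 = (m.count e : Int)) →
    ov2Loop d seen y = decide (2 ≤ seen + Multiset.card (m ∩ ↑y)) := by
  intro y
  induction y with
  | nil =>
    intro d m seen hseen hinv
    have hz : (↑([] : List Int) : Multiset Int) = 0 := rfl
    rw [ov2Loop, hz, Multiset.inter_zero]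
    exact (decide_eq_false (by simp only [Multiset.card_zero]; omega)).symm
  | cons e ys ih =>
    intro d m seen hseen hinv
    rw [ov2Loop]
    simp only [hinv e]
    by_cases hc : 0 < (m.count e : Int)
    · have hmem : e ∈ m := Multiset.count_pos.mp (by exact_mod_cast hc)
      rw [if_pos hc]
      rw [← Multiset.cons_coe, interConsMem e m (↑ys) hmem]
      by_cases hs : 2 ≤ seen + 1
      · rw [if_pos hs]
        exact (decide_eq_true (by omega)).symm
      · rw [if_neg hs]
        have hcnt : 1 ≤ m.count e := Multiset.count_pos.mpr hmem
        rw [ih (d.insert e ((m.count e : Int) - 1)) (m.erase e) (seen + 1) (by omega) ?_]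
        · exact decide_eq_decide.mpr (by omega)
        · intro e'
          by_cases he : e' = e
          · subst he
            rw [PySem.Dict.getD_insert_self, Multiset.count_erase_self]
            omega
          · rw [PySem.Dict.getD_insert, if_neg he, Multiset.count_erase_of_ne he, hinv]
    · rw [if_neg hc]
      have h0 : m.count e = 0 := by omega
      have hnm : e ∉ m := Multiset.count_eq_zero.mp h0
      rw [ih d m seen hseen hinv, ← Multiset.cons_coe, interConsRight e m (↑ys) hnm]

lemma pred_eq (x y : List Int) : canMerge (some x) (some y) = overlap2 x y := by
  rw [canMerge_some, overlap2]
  by_cases h : x.length < 2 ∨ y.length < 2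
  · rw [if_pos h, if_pos h]
  · rw [if_neg h, if_neg h]
    have hd : ∀ e, (x.foldl (fun d e => d.insert e (d.getD e 0 + 1)) PySem.Dict.empty).getD e 0
        = ((↑x : Multiset Int).count e : Int) := by
      intro e
      rw [PySem.Dict.foldl_insert_getD_add_one_eq_counter, PySem.Dict.getD_counter]
      rw [Multiset.coe_count]
    rw [ov2Loop_eq y _ (↑x) 0 (by omega) hd]
    exact decide_eq_decide.mpr (by omega)

-- the two merged-group expressions build the same sorted list
lemma merged_eq (g h : List Int) :
    PySem.List.sorted (PySem.Set.ofList (g ++ h)) (fun x => x) false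
      = PySem.List.sorted (PySem.Set.union (PySem.Set.ofList g) (PySem.Set.ofList h)) (fun x => x) false := by
  apply PySem.List.sorted_eq_sorted_of_perm _ _ _ (fun a b hab => hab)
  refine (List.perm_ext_iff_of_nodup (PySem.Set.nodup_ofList _) (PySem.Set.nodup_union _ _ (PySem.Set.nodup_ofList _))).mpr ?_
  intro x
  simp [PySem.Set.mem_ofList, PySem.Set.mem_union, List.mem_append]

-- ---- liveIdx bookkeeping: position i in A's matrix ↦ index in B's dense list ----
lemma liveIdx_cons_none (rest : List (Option (List Int))) (j : Nat) :
    liveIdx (none :: rest) (j + 1) = liveIdx rest j := by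
  simp [liveIdx]

lemma liveIdx_cons_some (a : List Int) (rest : List (Option (List Int))) (j : Nat) :
    liveIdx ((some a) :: rest) (j + 1) = liveIdx rest j + 1 := by
  simp [liveIdx]

lemma liveIdx_le (mat : List (Option (List Int))) (i : Nat) : liveIdx mat i ≤ i := by
  have h1 := List.reduceOption_length_le (mat.take i)
  have h2 : (mat.take i).length ≤ i := by rw [List.length_take]; omega
  unfold liveIdx; omega

lemma liveIdx_full (mat : List (Option (List Int))) (n : Nat) (h : mat.length ≤ n) :
    liveIdx mat n = mat.reduceOption.length := by
  simp [liveIdx, List.take_of_length_le h]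

lemma liveIdx_succ_some (mat : List (Option (List Int))) (j : Nat) (h0 : List Int)
    (h : mat[j]? = some (some h0)) : liveIdx mat (j + 1) = liveIdx mat j + 1 := by
  revert j h
  induction mat with
  | nil => intro j h; simp at h
  | cons x rest ih =>
    intro j h
    cases j with
    | zero => simp at h; subst h; simp [liveIdx]
    | succ j =>
      cases x with
      | none => rw [liveIdx_cons_none, liveIdx_cons_none]; exact ih j (by simpa using h)
      | some a => rw [liveIdx_cons_some, liveIdx_cons_some, ih j (by simpa using h)]

lemma liveIdx_succ_none (mat : List (Option (List Int))) (j : Nat)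
    (h : mat[j]? = some none) : liveIdx mat (j + 1) = liveIdx mat j := by
  revert j h
  induction mat with
  | nil => intro j h; simp at h
  | cons x rest ih =>
    intro j h
    cases j with
    | zero => simp at h; subst h; simp [liveIdx]
    | succ j =>
      cases x with
      | none => rw [liveIdx_cons_none, liveIdx_cons_none]; exact ih j (by simpa using h)
      | some a => rw [liveIdx_cons_some, liveIdx_cons_some, ih j (by simpa using h)]

lemma liveIdx_succ_oob (mat : List (Option (List Int))) (j : Nat) (h : mat.length ≤ j) :
    liveIdx mat (j + 1) = liveIdx mat j := by
  simp [liveIdx, List.take_of_length_le h, List.take_of_length_le (Nat.le_succ_of_le h)]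

lemma liveIdx_pos (mat : List (Option (List Int))) (j p : Nat) (h0 : List Int)
    (hj : j < p) (h : mat[j]? = some (some h0)) : 0 < liveIdx mat p := by
  have h1 : (mat.take p)[j]? = some (some h0) := by rw [List.getElem?_take_of_lt hj]; exact h
  have h2 : some h0 ∈ mat.take p := List.mem_of_getElem? h1
  have h3 : h0 ∈ (mat.take p).reduceOption := List.reduceOption_mem_iff.mpr h2
  unfold liveIdx
  exact List.length_pos_of_mem h3

lemma red_get (g : List Int) : ∀ (mat : List (Option (List Int))) (j : Nat),
    mat[j]? = some (some g) → (mat.reduceOption)[liveIdx mat j]? = some g := by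
  intro mat
  induction mat with
  | nil => intro j h; simp at h
  | cons x rest ih =>
    intro j h
    cases j with
    | zero => simp at h; subst h; simp [liveIdx]
    | succ j =>
      cases x with
      | none =>
        rw [liveIdx_cons_none, List.reduceOption_cons_of_none]
        exact ih j (by simpa using h)
      | some a =>
        rw [liveIdx_cons_some, List.reduceOption_cons_of_some]
        simpa using ih j (by simpa using h)

lemma red_set_some (v h0 : List Int) : ∀ (mat : List (Option (List Int))) (j : Nat),
    mat[j]? = some (some h0) →
    (mat.set j (some v)).reduceOption = (mat.reduceOption).set (liveIdx mat j) v := by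
  intro mat
  induction mat with
  | nil => intro j h; simp at h
  | cons x rest ih =>
    intro j h
    cases j with
    | zero => simp at h; subst h; simp [liveIdx]
    | succ j =>
      cases x with
      | none =>
        rw [liveIdx_cons_none]
        simpa [List.reduceOption_cons_of_none] using ih j (by simpa using h)
      | some a =>
        rw [liveIdx_cons_some]
        simpa [List.reduceOption_cons_of_some] using ih j (by simpa using h)

lemma red_set_none (g : List Int) : ∀ (mat : List (Option (List Int))) (i : Nat),
    mat[i]? = some (some g) →
    (mat.set i none).reduceOption = (mat.reduceOption).eraseIdx (liveIdx mat i) := by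
  intro mat
  induction mat with
  | nil => intro i h; simp at h
  | cons x rest ih =>
    intro i h
    cases i with
    | zero => simp at h; subst h; simp [liveIdx]
    | succ i =>
      cases x with
      | none =>
        rw [liveIdx_cons_none]
        simpa [List.reduceOption_cons_of_none] using ih i (by simpa using h)
      | some a =>
        rw [liveIdx_cons_some]
        simpa [List.reduceOption_cons_of_some] using ih i (by simpa using h)

lemma liveIdx_set_some (v h0 : List Int) : ∀ (mat : List (Option (List Int))) (j : Nat),
    mat[j]? = some (some h0) → ∀ i, liveIdx (mat.set j (some v)) i = liveIdx mat i := by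
  intro mat
  induction mat with
  | nil => intro j h; simp at h
  | cons x rest ih =>
    intro j h i
    cases j with
    | zero =>
      simp at h; subst h
      cases i with
      | zero => rfl
      | succ i => simp [liveIdx_cons_some]
    | succ j =>
      cases i with
      | zero => rfl
      | succ i =>
        cases x with
        | none => simp only [List.set_cons_succ, liveIdx_cons_none]; exact ih j (by simpa using h) i
        | some a => simp only [List.set_cons_succ, liveIdx_cons_some]; rw [ih j (by simpa using h) i]

lemma liveIdx_set_ge (v : Option (List Int)) : ∀ (mat : List (Option (List Int))) (p i : Nat),
    i ≤ p → liveIdx (mat.set p v) i = liveIdx mat i := by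
  intro mat
  induction mat with
  | nil => intro p i _; simp
  | cons x rest ih =>
    intro p i hle
    cases p with
    | zero =>
      interval_cases i
      rfl
    | succ p =>
      cases i with
      | zero => rfl
      | succ i =>
        cases x with
        | none => simp only [List.set_cons_succ, liveIdx_cons_none]; exact ih p i (by omega)
        | some a => simp only [List.set_cons_succ, liveIdx_cons_some]; rw [ih p i (by omega)]

-- ---- vacuous-scan lemmas ----
lemma canMerge_none_right (m : Option (List Int)) : canMerge m none = false := by
  cases m <;> rfl

lemma canMerge_none_left (n : Option (List Int)) : canMerge none n = false := rfl

lemma innerA_outer_none (mat : List (Option (List Int))) (i : Nat)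
    (h : mat.getD i none = none) : ∀ jc, innerA mat i jc = none := by
  intro jc
  induction jc with
  | zero => rfl
  | succ j ih =>
    rw [innerA, h, canMerge_none_left]
    simpa using ih

lemma innerA_below_none (mat : List (Option (List Int))) (i : Nat) :
    ∀ jc, (∀ j, j < jc → mat.getD j none = none) → innerA mat i jc = none := by
  intro jc
  induction jc with
  | zero => intro _; rfl
  | succ j ih =>
    intro h
    rw [innerA, h j (by omega), canMerge_none_right]
    simpa using ih (fun j' hj' => h j' (by omega))

lemma passA_id : ∀ (i : Nat) (mat : List (Option (List Int))) (flag : Bool),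
    (∀ j, j ≤ i → mat.getD j none = none) → passA mat i flag = (mat, flag) := by
  intro i
  induction i with
  | zero => intro mat flag _; rfl
  | succ i ih =>
    intro mat flag h
    rw [passA, innerA_outer_none mat (i + 1) (h (i + 1) le_rfl)]
    exact ih mat flag (fun j hj => h j (by omega))

-- ---- the state correspondence ----
lemma inner_eq (mat : List (Option (List Int))) (ip : Nat) (g : List Int)
    (hg : mat[ip]? = some (some g)) :
    ∀ jc, jc ≤ ip →
      (innerA mat ip jc).map List.reduceOption
        = innerB mat.reduceOption (liveIdx mat ip) (liveIdx mat jc) := by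
  have hglen : ip < mat.length := by
    by_contra hlt
    rw [List.getElem?_eq_none_iff.mpr (by omega)] at hg
    simp at hg
  have hgd : mat.getD ip none = some g := by rw [List.getD_eq_getElem?_getD, hg]; rfl
  intro jc
  induction jc with
  | zero => intro _; rfl
  | succ j ihj =>
    intro hle
    cases hx : mat[j]? with
    | none =>
      have := List.getElem?_eq_none_iff.mp hx
      omega
    | some o =>
      cases o with
      | none =>
        have hgdj : mat.getD j none = none := by rw [List.getD_eq_getElem?_getD, hx]; rfl
        rw [innerA, hgdj, canMerge_none_right, liveIdx_succ_none mat j hx]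
        simpa using ihj (by omega)
      | some hl =>
        have hgdj : mat.getD j none = some hl := by rw [List.getD_eq_getElem?_getD, hx]; rfl
        rw [innerA, hgdj, hgd, liveIdx_succ_some mat j hl hx, innerB]
        have hgk : (mat.reduceOption).getD (liveIdx mat ip) [] = g := by
          rw [List.getD_eq_getElem?_getD, red_get g mat ip hg]; rfl
        have hgt : (mat.reduceOption).getD (liveIdx mat j) [] = hl := by
          rw [List.getD_eq_getElem?_getD, red_get hl mat j hx]; rfl
        rw [hgk, hgt, ← pred_eq]
        by_cases hcm : canMerge (some g) (some hl) = true
        · rw [if_pos hcm, if_pos hcm, Option.map_some]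
          congr 1
          simp only [Option.getD_some]
          have hne : j ≠ ip := by omega
          have h1 : (mat.set j (some (PySem.List.sorted (PySem.Set.ofList (g ++ hl)) (fun x => x) false)))[ip]? = some (some g) := by
            rw [List.getElem?_set_ne hne]; exact hg
          rw [red_set_none g _ ip h1,
              liveIdx_set_some (PySem.List.sorted (PySem.Set.ofList (g ++ hl)) (fun x => x) false) hl mat j hx ip,
              red_set_some (PySem.List.sorted (PySem.Set.ofList (g ++ hl)) (fun x => x) false) hl mat j hx,
              merged_eq g hl]
        · rw [if_neg hcm, if_neg hcm]
          exact ihj (by omega)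

lemma innerA_liveIdx (mat mat' : List (Option (List Int))) (ip : Nat) :
    ∀ jc, innerA mat ip jc = some mat' → jc ≤ ip →
      ∀ q, q ≤ ip → liveIdx mat' q = liveIdx mat q := by
  intro jc
  induction jc with
  | zero => intro h; simp [innerA] at h
  | succ j ihj =>
    intro h hle q hq
    rw [innerA] at h
    by_cases hcm : canMerge (mat.getD ip none) (mat.getD j none) = true
    · rw [if_pos hcm] at h
      have hjne : mat.getD j none ≠ none := by
        intro hn
        rw [hn, canMerge_none_right] at hcm
        simp at hcm
      obtain ⟨hl, hx⟩ : ∃ hl, mat[j]? = some (some hl) := by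
        cases hxx : mat[j]? with
        | none => rw [List.getD_eq_getElem?_getD, hxx] at hjne; simp at hjne
        | some o =>
          cases o with
          | none => rw [List.getD_eq_getElem?_getD, hxx] at hjne; simp at hjne
          | some hl => exact ⟨hl, rfl⟩
      injection h with h2
      subst h2
      rw [liveIdx_set_ge none (mat.set j _) ip q hq,
          liveIdx_set_some _ hl mat j hx q]
    · rw [if_neg hcm] at h
      exact ihj h (by omega) q hq

lemma pass_eq : ∀ (i : Nat) (mat : List (Option (List Int))) (flag : Bool),
    ((passA mat i flag).1.reduceOption, (passA mat i flag).2)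
      = loopB mat.reduceOption (liveIdx mat (i + 1) - 1) flag := by
  intro i
  induction i with
  | zero =>
    intro mat flag
    have h1 : liveIdx mat (0 + 1) ≤ 0 + 1 := liveIdx_le mat (0 + 1)
    have h0 : liveIdx mat (0 + 1) - 1 = 0 := by omega
    rw [passA, h0, loopB]
  | succ i ih =>
    intro mat flag
    cases hx : mat[i + 1]? with
    | none =>
      have hlen : mat.length ≤ i + 1 := List.getElem?_eq_none_iff.mp hx
      have hgd : mat.getD (i + 1) none = none := by rw [List.getD_eq_getElem?_getD, hx]; rfl
      rw [passA, innerA_outer_none mat (i + 1) hgd, liveIdx_succ_oob mat (i + 1) hlen]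
      exact ih mat flag
    | some o =>
      cases o with
      | none =>
        have hgd : mat.getD (i + 1) none = none := by rw [List.getD_eq_getElem?_getD, hx]; rfl
        rw [passA, innerA_outer_none mat (i + 1) hgd, liveIdx_succ_none mat (i + 1) hx]
        exact ih mat flag
      | some g =>
        rw [passA, liveIdx_succ_some mat (i + 1) g hx]
        have hk : liveIdx mat (i + 1) + 1 - 1 = liveIdx mat (i + 1) := by omega
        rw [hk]
        cases hkz : liveIdx mat (i + 1) with
        | zero =>
          have hnone : ∀ j, j ≤ i → mat.getD j none = none := by
            intro j hj
            by_contra hne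
            obtain ⟨hl, hxx⟩ : ∃ hl, mat[j]? = some (some hl) := by
              cases hxx : mat[j]? with
              | none => rw [List.getD_eq_getElem?_getD, hxx] at hne; simp at hne
              | some o =>
                cases o with
                | none => rw [List.getD_eq_getElem?_getD, hxx] at hne; simp at hne
                | some hl => exact ⟨hl, rfl⟩
            have := liveIdx_pos mat j (i + 1) hl (by omega) hxx
            omega
          rw [innerA_below_none mat (i + 1) (i + 1) (fun j hj => hnone j (by omega)), loopB,
              passA_id i mat flag hnone]
        | succ k'' =>
          rw [loopB]
          have hinner := inner_eq mat (i + 1) g hx (i + 1) le_rfl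
          rw [hkz] at hinner
          cases hA : innerA mat (i + 1) (i + 1) with
          | none =>
            rw [hA] at hinner
            rw [← hinner]
            have hcnt : liveIdx mat (i + 1) - 1 = k'' := by omega
            rw [← hcnt]
            exact ih mat flag
          | some mat' =>
            rw [hA] at hinner
            rw [← hinner]
            have hli := innerA_liveIdx mat mat' (i + 1) (i + 1) hA le_rfl (i + 1) le_rfl
            have hcnt : liveIdx mat' (i + 1) - 1 = k'' := by omega
            have := ih mat' true
            rw [hcnt] at this
            exact this

lemma while_eq : ∀ (fuel : Nat) (mat : List (Option (List Int))),
    (whileA fuel mat).reduceOption = whileB fuel mat.reduceOption := by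
  intro fuel
  induction fuel with
  | zero => intro mat; rfl
  | succ fuel ih =>
    intro mat
    simp only [whileA, whileB]
    have hp := pass_eq (mat.length - 1) mat false
    have hcnt : liveIdx mat (mat.length - 1 + 1) = mat.reduceOption.length :=
      liveIdx_full mat _ (by omega)
    rw [hcnt] at hp
    have h1 := congrArg Prod.fst hp
    have h2 := congrArg Prod.snd hp
    simp only at h1 h2
    rw [← h1, ← h2]
    by_cases hf : (passA mat (mat.length - 1) false).2 = true
    · rw [if_pos hf, if_pos hf]
      exact ih _
    · rw [if_neg hf, if_neg hf]

lemma red_map_some (l : List (List Int)) : (l.map some).reduceOption = l := by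
  induction l <;> simp [*]

-- ===== VERDICT (by name: the statement is the Claim_ definition above) =====
theorem result_spec : Claim_equal_result := by
  intro matrix _
  show result matrix = result_alt matrix
  unfold result result_alt
  rw [while_eq, red_map_some]
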